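-- pv_equiv track=rewrite | github.com/cepalium/daily-coding-problems | python/353.py | max_width_with_height
-- ===== SOURCE A (Python) =====
-- def max_width_with_height(histogram, height):
--     max_width, current_width = 0, 0
--     for h in histogram:
--         if h >= height:  # update current width
--             current_width += 1
--         else:
--             current_width = 0
--         if current_width > max_width:  # update max width
--                 max_width = current_width
--     return max_width
-- ===== SOURCE B (Python) =====
-- def max_width_with_height(histogram, height):
--     # Divide and conquer: for a segment return (prefix run, suffix run, best run)
--     # of bars >= height; merge halves with the cross-boundary candidate ls + rp.
--     def solve(seg):
--         n = len(seg)
--         if n == 0: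
--             return (0, 0, 0)
--         if n == 1:
--             v = 1 if seg[0] >= height else 0
--             return (v, v, v)
--         mid = n // 2
--         lp, ls, lb = solve(seg[:mid])
--         rp, rs, rb = solve(seg[mid:])
--         pref = mid + rp if lp == mid else lp
--         suff = (n - mid) + ls if rs == n - mid else rs
--         best = max(lb, rb, ls + rp)
--         return (pref, suff, best)
--     return solve(histogram)[2]
-- ===== Notes on version B (the rewrite author's own statement) =====
-- stated objective: alternative
-- what changed: Replaces A's single linear pass with a running counter by a divide-and-conquer recursion: split the histogram in half, recursively compute (prefix run, suffix run, best run) of bars >= height for each half, and merge them with the cross-boundary candidate left.suffix + right.prefix.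
import Mathlib
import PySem

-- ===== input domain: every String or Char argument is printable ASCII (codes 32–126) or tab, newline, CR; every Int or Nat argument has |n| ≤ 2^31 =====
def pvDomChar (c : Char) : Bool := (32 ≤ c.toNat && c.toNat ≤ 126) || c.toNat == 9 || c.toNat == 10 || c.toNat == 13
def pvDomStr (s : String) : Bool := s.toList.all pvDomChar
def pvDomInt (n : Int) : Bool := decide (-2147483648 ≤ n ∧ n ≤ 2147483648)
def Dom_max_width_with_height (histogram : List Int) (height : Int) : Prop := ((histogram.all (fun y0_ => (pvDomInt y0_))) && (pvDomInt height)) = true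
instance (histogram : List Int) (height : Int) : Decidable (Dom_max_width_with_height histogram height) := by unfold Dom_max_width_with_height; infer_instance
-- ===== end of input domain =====

-- B replaces A's single-pass running counter by a divide-and-conquer recursion
-- (split in half, merge (prefix, suffix, best) triples); alternative, same value.

-- ===== PORT A =====
-- literal port of A's loop: state (max_width, current_width), two ifs in order
def max_width_with_height (histogram : List Int) (height : Int) : Int :=
  (histogram.foldl
    (fun (p : Int × Int) h =>
      let cw := if h ≥ height then p.2 + 1 else 0
      (if cw > p.1 then cw else p.1, cw))
    (0, 0)).1

-- ===== PORT B =====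
-- Source B's solve(seg): returns (prefix run, suffix run, best run); Python's
-- slices seg[:mid] / seg[mid:] (mid = len(seg)//2, in range) are take/drop.
-- The Nat fuel (= initial length, halving keeps it sufficient) only makes the
-- structural recursion total; it never alters the computed value.
def pvSolve (height : Int) : Nat → List Int → Int × Int × Int
  | _, [] => (0, 0, 0)
  | _, [x] => let v : Int := if x ≥ height then 1 else 0; (v, v, v)
  | 0, _ :: _ :: _ => (0, 0, 0)  -- never reached: fuel starts at the length
  | fuel + 1, x :: y :: rest =>
    let n := (x :: y :: rest).length
    let mid := n / 2
    let L := pvSolve height fuel ((x :: y :: rest).take mid)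
    let R := pvSolve height fuel ((x :: y :: rest).drop mid)
    let pref := if L.1 = (mid : Int) then (mid : Int) + R.1 else L.1
    let suff := if R.2.1 = ((n - mid : Nat) : Int) then ((n - mid : Nat) : Int) + L.2.1 else R.2.1
    (pref, suff, max (max L.2.2 R.2.2) (L.2.1 + R.1))

def max_width_with_height_alt (histogram : List Int) (height : Int) : Int :=
  (pvSolve height histogram.length histogram).2.2

-- ===== PRECONDITION & SPEC =====
def Spec_max_width_with_height (histogram : List Int) (height : Int) (out : Int) : Prop := out = max_width_with_height_alt histogram height
instance (histogram : List Int) (height : Int) (out : Int) : Decidable (Spec_max_width_with_height histogram height out) := by unfold Spec_max_width_with_height; infer_instance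

-- ===== CLAIM (what is proved, stated in full; the proofs are below) =====
def Claim_equal_max_width_with_height : Prop := ∀ (histogram : List Int) (height : Int), Dom_max_width_with_height histogram height → Spec_max_width_with_height histogram height (max_width_with_height histogram height)

-- ===== LEMMAS AND PROOFS =====

-- pvH height c l = max of the "current_width" values A sees scanning l from carry c
def pvH (height c : Int) : List Int → Int
  | [] => 0
  | h :: t =>
    let c' := if h ≥ height then c + 1 else 0
    max c' (pvH height c' t)

-- pvE height c l = the final current width after scanning l from carry c
def pvE (height c : Int) : List Int → Int
  | [] => c
  | h :: t => pvE height (if h ≥ height then c + 1 else 0) t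

-- spec functions: prefix and suffix runs of bars ≥ height
def pvPref (height : Int) (l : List Int) : Int :=
  ((l.takeWhile (fun x => decide (x ≥ height))).length : Int)

def pvSuff (height : Int) (l : List Int) : Int := pvPref height l.reverse

theorem pvH_nonneg (height c : Int) (l : List Int) : 0 ≤ pvH height c l := by
  induction l generalizing c with
  | nil => simp [pvH]
  | cons h t ih => simp only [pvH]; exact le_trans (ih _) (le_max_right _ _)

theorem pvPref_nonneg (height : Int) (l : List Int) : 0 ≤ pvPref height l :=
  Int.natCast_nonneg _

theorem foldA_eq (height : Int) (l : List Int) :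
    ∀ m c : Int, 0 ≤ m →
      (l.foldl
        (fun (p : Int × Int) h =>
          let cw := if h ≥ height then p.2 + 1 else 0
          (if cw > p.1 then cw else p.1, cw)) (m, c)).1
      = max m (pvH height c l) := by
  induction l with
  | nil => intro m c hm; simp [pvH]; omega
  | cons h t ih =>
    intro m c hm
    simp only [List.foldl_cons, pvH]
    set c' := if h ≥ height then c + 1 else 0 with hc'
    have h1 : (if c' > m then c' else m) = max m c' := by split_ifs <;> omega
    rw [h1, ih (max m c') c' (le_trans hm (le_max_left _ _)), max_assoc]

theorem pvH_append (height c : Int) (l r : List Int) :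
    pvH height c (l ++ r) = max (pvH height c l) (pvH height (pvE height c l) r) := by
  induction l generalizing c with
  | nil => simp [pvH, pvE, max_eq_right (pvH_nonneg height c r)]
  | cons x t ih =>
    simp only [List.cons_append, pvH, pvE]
    rw [ih, max_assoc]

theorem pvE_append (height c : Int) (l r : List Int) :
    pvE height c (l ++ r) = pvE height (pvE height c l) r := by
  induction l generalizing c with
  | nil => simp [pvE]
  | cons x t ih => simp only [List.cons_append, pvE]; rw [ih]

theorem pvE_eq_suff (height : Int) (l : List Int) : pvE height 0 l = pvSuff height l := by
  induction l using List.reverseRecOn with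
  | nil => simp [pvE, pvSuff, pvPref]
  | append_singleton l x ih =>
    rw [pvE_append]
    by_cases hx : x ≥ height
    · have h1 : pvE height (pvE height 0 l) [x] = pvE height 0 l + 1 := by
        simp [pvE, if_pos hx]
      rw [h1, ih]
      unfold pvSuff pvPref
      rw [List.reverse_append]
      simp only [List.reverse_singleton, List.singleton_append, List.takeWhile_cons,
        decide_eq_true hx, if_true, List.length_cons]
      push_cast
      omega
    · have h1 : pvE height (pvE height 0 l) [x] = 0 := by
        simp [pvE, if_neg hx]
      rw [h1]
      unfold pvSuff pvPref
      rw [List.reverse_append]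
      simp [List.takeWhile_cons, decide_eq_false hx]

theorem pvE_le_pvH (height : Int) (l : List Int) (hl : l ≠ []) :
    ∀ c : Int, 0 ≤ c → pvE height c l ≤ pvH height c l := by
  induction l with
  | nil => exact absurd rfl hl
  | cons x t ih =>
    intro c hc
    simp only [pvE, pvH]
    set c' := if x ≥ height then c + 1 else 0 with hc'
    have hc0' : 0 ≤ c' := by split_ifs at hc' <;> omega
    cases t with
    | nil => simp only [pvE]; exact le_max_left _ _
    | cons y t' =>
      have := ih (by simp) c' hc0'
      exact le_trans this (le_max_right _ _)

theorem pvSuff_le_pvH (height : Int) (l : List Int) :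
    pvSuff height l ≤ pvH height 0 l := by
  cases l with
  | nil => simp [pvSuff, pvPref, pvH]
  | cons x t =>
    rw [← pvE_eq_suff]
    exact pvE_le_pvH height (x :: t) (by simp) 0 le_rfl

theorem pvSuff_nonneg (height : Int) (l : List Int) : 0 ≤ pvSuff height l :=
  Int.natCast_nonneg _

-- prefix run with a carry: scanning x::r' (x ≥ height) from carry c
theorem pvH_carry (height : Int) :
    ∀ (r' : List Int) (x : Int), x ≥ height → ∀ c : Int, 0 ≤ c →
      pvH height c (x :: r')
        = max (c + pvPref height (x :: r'))
            (pvH height 0 ((x :: r').dropWhile (fun z => decide (z ≥ height)))) := by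
  intro r'
  induction r' with
  | nil =>
    intro x hx c hc
    simp [pvH, pvPref, List.dropWhile, decide_eq_true hx, if_pos hx]
  | cons y r'' ih =>
    intro x hx c hc
    by_cases hy : y ≥ height
    · have h1 := ih y hy (c + 1) (by omega)
      have h0 : pvH height c (x :: y :: r'') = max (c + 1) (pvH height (c + 1) (y :: r'')) := by
        simp [pvH, if_pos hx]
      rw [h0, h1]
      have hpp : pvPref height (x :: y :: r'') = 1 + pvPref height (y :: r'') := by
        unfold pvPref
        simp [List.takeWhile_cons, decide_eq_true hx]
        push_cast; ring
      have hdd : (x :: y :: r'').dropWhile (fun z => decide (z ≥ height))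
          = (y :: r'').dropWhile (fun z => decide (z ≥ height)) := by
        simp [List.dropWhile_cons, decide_eq_true hx]
      rw [hpp, hdd]
      have := pvPref_nonneg height (y :: r'')
      omega
    · have h0 : pvH height c (x :: y :: r'') = max (c + 1) (pvH height 0 (y :: r'')) := by
        simp only [pvH, if_pos hx, if_neg hy]
      have hpp : pvPref height (x :: y :: r'') = 1 := by
        unfold pvPref
        simp [List.takeWhile_cons, decide_eq_true hx, decide_eq_false hy]
      have hdd : (x :: y :: r'').dropWhile (fun z => decide (z ≥ height)) = y :: r'' := by
        simp [List.dropWhile_cons, decide_eq_true hx, decide_eq_false hy]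
      rw [h0, hpp, hdd]

-- the divide-and-conquer merge for the best run
theorem pvH_combine (height : Int) (l r : List Int) :
    pvH height 0 (l ++ r)
      = max (max (pvH height 0 l) (pvH height 0 r)) (pvSuff height l + pvPref height r) := by
  rw [pvH_append, pvE_eq_suff]
  set s := pvSuff height l with hs
  have hs0 : 0 ≤ s := pvSuff_nonneg height l
  have hsl : s ≤ pvH height 0 l := pvSuff_le_pvH height l
  cases r with
  | nil =>
    simp [pvH, pvPref]
    omega
  | cons x r' =>
    by_cases hx : x ≥ height
    · have h1 := pvH_carry height r' x hx s hs0
      have h2 := pvH_carry height r' x hx 0 le_rfl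
      rw [h1, h2]
      have hp := pvPref_nonneg height (x :: r')
      have hd := pvH_nonneg height 0 ((x :: r').dropWhile (fun z => decide (z ≥ height)))
      omega
    · have h1 : pvH height s (x :: r') = pvH height 0 (x :: r') := by
        simp [pvH, if_neg hx]
      have hpp : pvPref height (x :: r') = 0 := by
        unfold pvPref
        simp [List.takeWhile_cons, decide_eq_false hx]
      rw [h1, hpp]
      have := pvH_nonneg height 0 (x :: r')
      omega

-- the divide-and-conquer merge for the prefix run
theorem pvPref_append (height : Int) (l r : List Int) :
    pvPref height (l ++ r)
      = if pvPref height l = (l.length : Int)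
        then (l.length : Int) + pvPref height r else pvPref height l := by
  induction l with
  | nil => simp [pvPref]
  | cons x t ih =>
    by_cases hx : x ≥ height
    · have h1 : pvPref height ((x :: t) ++ r) = 1 + pvPref height (t ++ r) := by
        unfold pvPref
        simp [List.takeWhile_cons, decide_eq_true hx]
        push_cast; ring
      have h2 : pvPref height (x :: t) = 1 + pvPref height t := by
        unfold pvPref
        simp [List.takeWhile_cons, decide_eq_true hx]
        push_cast; ring
      rw [h1, h2, ih]
      have hlen : ((x :: t).length : Int) = 1 + (t.length : Int) := by
        rw [List.length_cons]; push_cast; ring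
      rw [hlen]
      split_ifs with hA hB hB <;> omega
    · have h1 : pvPref height ((x :: t) ++ r) = 0 := by
        unfold pvPref
        simp [List.takeWhile_cons, decide_eq_false hx]
      have h2 : pvPref height (x :: t) = 0 := by
        unfold pvPref
        simp [List.takeWhile_cons, decide_eq_false hx]
      have hlen : (0 : Int) ≠ ((x :: t).length : Int) := by
        simp only [List.length_cons]; push_cast; omega
      rw [h1, h2, if_neg hlen]

-- the divide-and-conquer merge for the suffix run (via reverse)
theorem pvSuff_append (height : Int) (l r : List Int) :
    pvSuff height (l ++ r)
      = if pvSuff height r = (r.length : Int)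
        then (r.length : Int) + pvSuff height l else pvSuff height r := by
  unfold pvSuff
  rw [List.reverse_append, pvPref_append]
  simp [List.length_reverse]

-- solve computes exactly (prefix run, suffix run, best run)
theorem pvSolve_eq_aux (height : Int) : ∀ (N : Nat) (seg : List Int), seg.length ≤ N →
    pvSolve height N seg = (pvPref height seg, pvSuff height seg, pvH height 0 seg) := by
  intro N
  induction N with
  | zero =>
    intro seg hs
    have h0 : seg = [] := List.eq_nil_of_length_eq_zero (by omega)
    subst h0
    simp [pvSolve, pvPref, pvSuff, pvH]
  | succ N ihN =>
    intro seg hs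
    rcases seg with _ | ⟨x, _ | ⟨y, rest⟩⟩
    · simp [pvSolve, pvPref, pvSuff, pvH]
    · by_cases hx : x ≥ height
      · simp [pvSolve, pvPref, pvSuff, pvH, if_pos hx, decide_eq_true hx]
      · simp [pvSolve, pvPref, pvSuff, pvH, if_neg hx, decide_eq_false hx]
    · have hlen : (x :: y :: rest).length = rest.length + 2 := by simp
      have htake : ((x :: y :: rest).take ((x :: y :: rest).length / 2)).length ≤ N := by
        rw [List.length_take, hlen]
        rw [hlen] at hs
        omega
      have hdrop : ((x :: y :: rest).drop ((x :: y :: rest).length / 2)).length ≤ N := by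
        rw [List.length_drop, hlen]
        rw [hlen] at hs
        omega
      have hminT : min ((x :: y :: rest).length / 2) (x :: y :: rest).length
          = (x :: y :: rest).length / 2 := by
        rw [hlen]; omega
      have hPref : pvPref height (x :: y :: rest)
          = if pvPref height ((x :: y :: rest).take ((x :: y :: rest).length / 2))
              = (((x :: y :: rest).length / 2 : Nat) : Int)
            then (((x :: y :: rest).length / 2 : Nat) : Int)
              + pvPref height ((x :: y :: rest).drop ((x :: y :: rest).length / 2))
            else pvPref height ((x :: y :: rest).take ((x :: y :: rest).length / 2)) := by
        conv_lhs => rw [← List.take_append_drop ((x :: y :: rest).length / 2) (x :: y :: rest)]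
        rw [pvPref_append, List.length_take, hminT]
      have hSuff : pvSuff height (x :: y :: rest)
          = if pvSuff height ((x :: y :: rest).drop ((x :: y :: rest).length / 2))
              = (((x :: y :: rest).length - (x :: y :: rest).length / 2 : Nat) : Int)
            then (((x :: y :: rest).length - (x :: y :: rest).length / 2 : Nat) : Int)
              + pvSuff height ((x :: y :: rest).take ((x :: y :: rest).length / 2))
            else pvSuff height ((x :: y :: rest).drop ((x :: y :: rest).length / 2)) := by
        conv_lhs => rw [← List.take_append_drop ((x :: y :: rest).length / 2) (x :: y :: rest)]
        rw [pvSuff_append, List.length_drop]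
      have hBest : pvH height 0 (x :: y :: rest)
          = max (max (pvH height 0 ((x :: y :: rest).take ((x :: y :: rest).length / 2)))
                     (pvH height 0 ((x :: y :: rest).drop ((x :: y :: rest).length / 2))))
              (pvSuff height ((x :: y :: rest).take ((x :: y :: rest).length / 2))
                + pvPref height ((x :: y :: rest).drop ((x :: y :: rest).length / 2))) := by
        conv_lhs => rw [← List.take_append_drop ((x :: y :: rest).length / 2) (x :: y :: rest)]
        rw [pvH_combine]
      simp only [pvSolve]
      rw [ihN _ htake, ihN _ hdrop, hPref, hSuff, hBest]

theorem pvSolve_eq (height : Int) (seg : List Int) :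
    pvSolve height seg.length seg = (pvPref height seg, pvSuff height seg, pvH height 0 seg) :=
  pvSolve_eq_aux height seg.length seg le_rfl

-- ===== VERDICT (by name: the statement is the Claim_ definition above) =====
theorem max_width_with_height_spec : Claim_equal_max_width_with_height := by
  intro histogram height _
  unfold Spec_max_width_with_height max_width_with_height max_width_with_height_alt
  rw [foldA_eq height histogram 0 0 le_rfl, pvSolve_eq]
  simp only
  have := pvH_nonneg height 0 histogram
  omega
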